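-- pv_equiv track=rewrite | github.com/thunlp/DeepTHULAC | deepthulac/seg/cut_sent.py | restore_batch
-- ===== SOURCE A (Python) =====
-- def restore_batch(results, input_id2raw_id, accumulate_span=False):
--     ori_results = [[] for _ in range(len(set(input_id2raw_id)))]
--     for input_id, res in enumerate(results):
--         raw_id = input_id2raw_id[input_id]
--         if accumulate_span and ori_results[raw_id]:  # 对于span，要序号要统一加上前面的长度
--             start = ori_results[raw_id][-1][-1]+1
--             res = [(r[0]+start, r[1]+start) for r in res]
--         ori_results[raw_id].extend(res)
--     return ori_results
-- ===== SOURCE B (Python) =====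
-- def restore_batch(results, input_id2raw_id, accumulate_span=False):
--     # Pass 1: group each result under its raw id (no offsetting yet).
--     groups = [[] for _ in range(len(set(input_id2raw_id)))]
--     for input_id, res in enumerate(results):
--         groups[input_id2raw_id[input_id]].append(res)
--     # Pass 2: flatten each group, shifting spans past what is already emitted.
--     out = []
--     for group in groups:
--         acc = []
--         for seg in group:
--             if accumulate_span and acc:
--                 off = acc[-1][1] + 1
--                 seg = [(a + off, b + off) for a, b in seg]
--             acc.extend(seg)
--         out.append(acc)
--     return out
-- ===== Notes on version B (the rewrite author's own statement) =====
-- stated objective: alternative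
-- what changed: A's single fused loop that mutates per-raw-id buckets and applies the span offset at insertion time is split into two passes: first bucket the raw result lists by raw id, then flatten each bucket while shifting each segment past the already-emitted spans.
import Mathlib
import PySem

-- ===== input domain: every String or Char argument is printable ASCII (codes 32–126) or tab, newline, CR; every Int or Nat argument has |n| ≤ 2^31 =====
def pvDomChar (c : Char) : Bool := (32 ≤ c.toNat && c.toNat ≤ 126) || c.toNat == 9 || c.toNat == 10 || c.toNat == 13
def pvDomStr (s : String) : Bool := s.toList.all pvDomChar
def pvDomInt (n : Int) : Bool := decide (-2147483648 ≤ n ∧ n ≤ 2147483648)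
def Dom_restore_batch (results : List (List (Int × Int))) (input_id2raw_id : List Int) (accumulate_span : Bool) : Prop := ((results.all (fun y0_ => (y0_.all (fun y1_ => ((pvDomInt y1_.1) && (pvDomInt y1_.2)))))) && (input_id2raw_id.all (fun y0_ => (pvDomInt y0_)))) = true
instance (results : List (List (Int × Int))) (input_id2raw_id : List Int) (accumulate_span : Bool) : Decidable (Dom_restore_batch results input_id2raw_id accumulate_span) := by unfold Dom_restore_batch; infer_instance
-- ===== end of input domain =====

-- B regroups in two passes (bucket the per-input results by raw id, then flatten each
-- bucket with the span offset) instead of A's single fused mutate-in-place loop;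
-- objective: simpler/alternative decomposition, same cost.

-- ===== PORT A =====
-- A's fused loop: one mutable list of buckets, read bucket / offset res / extend bucket
-- at each step.  pyGet?/pySet? model Python's (possibly negative) list indexing; the
-- Option state is `none` exactly where Python raises IndexError (excluded by Pre_).
def restoreLoopA (ids : List Int) (acc_span : Bool) :
    List (List (Int × Int)) → Int → List (List (Int × Int)) → Option (List (List (Int × Int)))
  | ori, _, [] => some ori
  | ori, i, res :: rest =>
    match PySem.List.pyGet? ids i with
    | none => none
    | some raw_id =>
      match PySem.List.pyGet? ori raw_id with
      | none => none
      | some bucket =>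
        let res' := if acc_span && !bucket.isEmpty then
            -- start = ori_results[raw_id][-1][-1] + 1 ; the getD is unreachable (bucket ≠ [])
            let start := (bucket.getLast?.getD (0, 0)).2 + 1
            res.map (fun r => (r.1 + start, r.2 + start))
          else res
        match PySem.List.pySet? ori raw_id (bucket ++ res') with
        | none => none
        | some ori' => restoreLoopA ids acc_span ori' (i + 1) rest

def restore_batch (results : List (List (Int × Int))) (input_id2raw_id : List Int) (accumulate_span : Bool) : List (List (Int × Int)) :=
  let ori := List.replicate (PySem.Set.ofList input_id2raw_id).length ([] : List (Int × Int))
  (restoreLoopA input_id2raw_id accumulate_span ori 0 results).getD []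

-- ===== PORT B =====
-- B pass 1: bucket the raw (unshifted) result lists by raw id.
def restoreLoopB (ids : List Int) :
    List (List (List (Int × Int))) → Int → List (List (Int × Int)) → Option (List (List (List (Int × Int))))
  | gs, _, [] => some gs
  | gs, i, res :: rest =>
    match PySem.List.pyGet? ids i with
    | none => none
    | some raw_id =>
      match PySem.List.pyGet? gs raw_id with
      | none => none
      | some group =>
        match PySem.List.pySet? gs raw_id (group ++ [res]) with
        | none => none
        | some gs' => restoreLoopB ids gs' (i + 1) rest

-- B pass 2: flatten one bucket, shifting each segment past what is already emitted.
def flattenStep (acc_span : Bool) (acc seg : List (Int × Int)) : List (Int × Int) :=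
  let seg := if acc_span && !acc.isEmpty then
      let off := (acc.getLast?.getD (0, 0)).2 + 1   -- off = acc[-1][1] + 1 (acc ≠ [])
      seg.map (fun r => (r.1 + off, r.2 + off))
    else seg
  acc ++ seg

def flattenGroup (acc_span : Bool) (group : List (List (Int × Int))) : List (Int × Int) :=
  group.foldl (flattenStep acc_span) []

def restore_batch_alt (results : List (List (Int × Int))) (input_id2raw_id : List Int) (accumulate_span : Bool) : List (List (Int × Int)) :=
  let groups := List.replicate (PySem.Set.ofList input_id2raw_id).length ([] : List (List (Int × Int)))
  match restoreLoopB input_id2raw_id groups 0 results with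
  | none => []
  | some gs => gs.map (flattenGroup accumulate_span)

-- ===== PRECONDITION & SPEC =====
-- Pre_ excludes exactly the inputs where Python A raises IndexError: an input id beyond
-- input_id2raw_id, or a raw id outside Python's (negative-index-aware) range of the bucket list.
def Pre_restore_batch (results : List (List (Int × Int))) (input_id2raw_id : List Int) (accumulate_span : Bool) : Prop :=
  results.length ≤ input_id2raw_id.length ∧
  ∀ r ∈ input_id2raw_id.take results.length,
    PySem.Raise.InRange (PySem.Set.ofList input_id2raw_id).length r
instance (results : List (List (Int × Int))) (input_id2raw_id : List Int) (accumulate_span : Bool) : Decidable (Pre_restore_batch results input_id2raw_id accumulate_span) := by unfold Pre_restore_batch; infer_instance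

def pvWitness_restore_batch : (List (List (Int × Int))) × List Int × Bool :=
  ([[(0, 1), (3, 4)], [], [(0, 2)]], [0, 1, 0], true)

def Spec_restore_batch (results : List (List (Int × Int))) (input_id2raw_id : List Int) (accumulate_span : Bool) (out : List (List (Int × Int))) : Prop := out = restore_batch_alt results input_id2raw_id accumulate_span
instance (results : List (List (Int × Int))) (input_id2raw_id : List Int) (accumulate_span : Bool) (out : List (List (Int × Int))) : Decidable (Spec_restore_batch results input_id2raw_id accumulate_span out) := by unfold Spec_restore_batch; infer_instance

-- ===== CLAIM (what is proved, stated in full; the proofs are below) =====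
def Claim_equal_restore_batch : Prop := ∀ (results : List (List (Int × Int))) (input_id2raw_id : List Int) (accumulate_span : Bool), Dom_restore_batch results input_id2raw_id accumulate_span → Pre_restore_batch results input_id2raw_id accumulate_span → Spec_restore_batch results input_id2raw_id accumulate_span (restore_batch results input_id2raw_id accumulate_span)

-- ===== LEMMAS AND PROOFS =====

-- pyGet?/pySet? commute with mapping the list (A's bucket list = B's group list mapped).
theorem pyGet?_map_comm {a b : Type} (f : a → b) (xs : List a) (i : Int) :
    PySem.List.pyGet? (xs.map f) i = (PySem.List.pyGet? xs i).map f := by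
  simp only [PySem.List.pyGet?, List.length_map]
  cases PySem.List.pyIdx? xs.length i <;> simp

theorem pySet?_map_comm {a b : Type} (f : a → b) (xs : List a) (i : Int) (v : a) :
    PySem.List.pySet? (xs.map f) i (f v) = (PySem.List.pySet? xs i v).map (List.map f) := by
  simp only [PySem.List.pySet?, List.length_map]
  cases PySem.List.pyIdx? xs.length i <;> simp

-- A's per-step bucket update is B's pass-2 step applied once more.
theorem flattenGroup_append (b : Bool) (g : List (List (Int × Int))) (seg : List (Int × Int)) :
    flattenGroup b (g ++ [seg]) = flattenStep b (flattenGroup b g) seg := by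
  simp [flattenGroup, List.foldl_append]

-- Loop invariant: A's bucket list is B's group list mapped through pass 2.
theorem loopA_eq_map_loopB (ids : List Int) (b : Bool) :
    ∀ (rest : List (List (Int × Int))) (i : Int) (gs : List (List (List (Int × Int)))),
      restoreLoopA ids b (gs.map (flattenGroup b)) i rest
        = (restoreLoopB ids gs i rest).map (List.map (flattenGroup b)) := by
  intro rest
  induction rest with
  | nil => intro i gs; simp [restoreLoopA, restoreLoopB]
  | cons res rest ih =>
    intro i gs
    simp only [restoreLoopA, restoreLoopB]
    cases hid : PySem.List.pyGet? ids i with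
    | none => simp
    | some raw_id =>
      simp only []
      rw [pyGet?_map_comm]
      cases hg : PySem.List.pyGet? gs raw_id with
      | none => simp
      | some group =>
        simp only [Option.map_some]
        have hstep : flattenGroup b group ++
            (if b && !(flattenGroup b group).isEmpty then
              (fun res => res.map (fun r => (r.1 + (((flattenGroup b group).getLast?.getD (0, 0)).2 + 1),
                                              r.2 + (((flattenGroup b group).getLast?.getD (0, 0)).2 + 1)))) res
             else res)
            = flattenGroup b (group ++ [res]) := by
          rw [flattenGroup_append]; rfl
        rw [hstep, pySet?_map_comm]
        cases hset : PySem.List.pySet? gs raw_id (group ++ [res]) with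
        | none => simp
        | some gs' => simpa using ih (i + 1) gs'

-- ===== VERDICT (by name: the statement is the Claim_ definition above) =====
theorem restore_batch_spec : Claim_equal_restore_batch := by
  intro results ids acc _ _
  unfold Spec_restore_batch restore_batch restore_batch_alt
  have h0 : (List.replicate (PySem.Set.ofList ids).length ([] : List (Int × Int)))
      = (List.replicate (PySem.Set.ofList ids).length ([] : List (List (Int × Int)))).map (flattenGroup acc) := by
    simp [List.map_replicate, flattenGroup]
  rw [h0]
  simp only [loopA_eq_map_loopB]
  cases restoreLoopB ids (List.replicate (PySem.Set.ofList ids).length []) 0 results <;> simp
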